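-- pv_equiv track=rewrite | github.com/zby152/codes | python/蓝桥杯/搜索/七段吗.py | check
-- ===== SOURCE A (Python) =====
-- from collections import deque
--
-- connect=[[1,5],[0,2,6],[1,3,6],[2,4],[3,5,6],[0,4,6],[1,2,4,5]]
--
-- def check(l):
--     q=deque()
--     vis=[0]*7
--     num=0
--     for i in range(7):
--         if l[i]==1:
--             q.append(i)
--             vis[i]=1
--             break
--         num+=1
--     while q:
--         x=q.popleft()
--         for nx in connect[x]:
--             if vis[nx]==0 and l[nx]==1:
--                 q.append(nx)
--                 vis[nx]=1
--     for i in range(7):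
--         if vis[i]!=l[i]:
--             return False
--     if num==7: return False
--     return True
-- ===== SOURCE B (Python) =====
-- def check(l):
--     connect = [[1, 5], [0, 2, 6], [1, 3, 6], [2, 4], [3, 5, 6], [0, 4, 6], [1, 2, 4, 5]]
--     vals = [l[i] for i in range(7)]
--     if any(v not in (0, 1) for v in vals):
--         return False
--     parent = list(range(7))
--
--     def find(x):
--         while parent[x] != x:
--             x = parent[x]
--         return x
--
--     for i in range(7):
--         if vals[i] == 1:
--             for j in connect[i]:
--                 if vals[j] == 1:
--                     ri, rj = find(i), find(j)
--                     if ri != rj: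
--                         parent[ri] = rj
--     roots = {find(i) for i in range(7) if vals[i] == 1}
--     return len(roots) == 1
-- ===== Notes on version B (the rewrite author's own statement) =====
-- stated objective: alternative
-- what changed: Replaces A's seeded BFS over the lit cells followed by a vis-vs-l comparison with an explicit 0/1 validation plus a union-find over lit segment edges, testing that the lit cells have exactly one root.
-- outside the precondition, e.g. on check([-14, 9, 3073, 1, -1]): A returns False, B raises IndexError
import Mathlib
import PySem

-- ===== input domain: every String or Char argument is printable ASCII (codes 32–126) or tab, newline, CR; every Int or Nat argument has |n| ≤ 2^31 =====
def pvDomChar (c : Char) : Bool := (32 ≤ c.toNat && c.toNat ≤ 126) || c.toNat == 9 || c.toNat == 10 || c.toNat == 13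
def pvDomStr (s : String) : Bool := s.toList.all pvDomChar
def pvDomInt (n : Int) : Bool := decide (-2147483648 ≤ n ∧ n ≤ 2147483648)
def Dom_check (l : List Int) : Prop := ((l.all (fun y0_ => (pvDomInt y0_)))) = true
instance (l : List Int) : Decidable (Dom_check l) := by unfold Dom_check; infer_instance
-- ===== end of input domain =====

-- B replaces A's seeded BFS + vis/l comparison by a union-find over the lit cells
-- (alternative decomposition, same cost on the fixed 7-cell board).

-- ===== PORT A =====
def connectA : List (List Nat) := [[1,5],[0,2,6],[1,3,6],[2,4],[3,5,6],[0,4,6],[1,2,4,5]]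

-- the first loop: index of the first i in 0..6 with l[i]==1 (Python's `num`), none ⇒ num==7
def firstLit (l : List Int) : List Nat → Option Nat
  | [] => none
  | i :: rest =>
      if PySem.List.pyGetD l (i : Int) 0 == 1 then some i else firstLit l rest

-- body of `for nx in connect[x]` acting on the state (vis, q)
def relaxStep (l : List Int) (s : List Int × List Nat) (nx : Nat) : List Int × List Nat :=
  if PySem.List.pyGetD s.1 (nx : Int) 0 == 0 && PySem.List.pyGetD l (nx : Int) 0 == 1
  then (s.1.set nx 1, s.2 ++ [nx]) else s

-- `while q:` loop; the fuel 16 is a totality guard only (each enqueue marks a fresh cell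
-- of the 7-cell vis, so the loop runs at most 8 iterations)
def bfs (l : List Int) : Nat → List Int → List Nat → List Int
  | 0, vis, _ => vis
  | _ + 1, vis, [] => vis
  | fuel + 1, vis, x :: q =>
      let s := (connectA.getD x []).foldl (relaxStep l) (vis, q)
      bfs l fuel s.1 s.2

def check (l : List Int) : Bool :=
  let vis0 : List Int := List.replicate 7 0
  let st :=
    match firstLit l (List.range 7) with
    | some i => (i, vis0.set i 1, [i])
    | none => (7, vis0, ([] : List Nat))
  let vis := bfs l 16 st.2.1 st.2.2
  if !((List.range 7).all fun i =>
        PySem.List.pyGetD vis (i : Int) 0 == PySem.List.pyGetD l (i : Int) 0) then false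
  else if st.1 == 7 then false
  else true

-- ===== PORT B =====
def connectB : List (List Nat) := [[1,5],[0,2,6],[1,3,6],[2,4],[3,5,6],[0,4,6],[1,2,4,5]]

-- `find`: chase parent pointers to the root; fuel 8 is a totality guard only
-- (parent chains over 7 nodes are shorter)
def ufFind (parent : List Nat) : Nat → Nat → Nat
  | 0, x => x
  | f + 1, x =>
      let p := parent.getD x x
      if p == x then x else ufFind parent f p

-- body of `for i in range(7)`: union i with its lit neighbours
def ufUnions (v : List Int) (parent : List Nat) (i : Nat) : List Nat :=
  if v.getD i 0 == 1 then
    (connectB.getD i []).foldl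
      (fun par j =>
        if v.getD j 0 == 1 then
          let ri := ufFind par 8 i
          let rj := ufFind par 8 j
          if ri != rj then par.set ri rj else par
        else par) parent
  else parent

def check_alt (l : List Int) : Bool :=
  let v := (List.range 7).map fun (i : Nat) => PySem.List.pyGetD l (i : Int) 0
  if !(v.all fun x => x == 0 || x == 1) then false
  else
    let parent := (List.range 7).foldl (ufUnions v) (List.range 7)
    let roots := PySem.Set.ofList
      (((List.range 7).filter fun i => v.getD i 0 == 1).map (ufFind parent 8))
    roots.length == 1

-- ===== PRECONDITION & SPEC =====
-- Pre_ excludes lists shorter than 7: Python A reads the first seven entries and raises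
-- IndexError there, except that it can return False early when a vis-vs-l mismatch is found
-- before an out-of-range read; B reads all seven cells first and raises IndexError on all
-- of these inputs (see the cite in claim.json).
def Pre_check (l : List Int) : Prop := 7 ≤ l.length
instance (l : List Int) : Decidable (Pre_check l) := by unfold Pre_check; infer_instance
def pvWitness_check : List Int := [1, 1, 0, 0, 0, 0, 1]

def Spec_check (l : List Int) (out : Bool) : Prop := out = check_alt l
instance (l : List Int) (out : Bool) : Decidable (Spec_check l out) := by unfold Spec_check; infer_instance

-- ===== CLAIM (what is proved, stated in full; the proofs are below) =====
def Claim_equal_check : Prop := ∀ (l : List Int), Dom_check l → Pre_check l → Spec_check l (check l)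

-- ===== LEMMAS AND PROOFS =====

theorem connectA_mem_lt (x nx : Nat) (h : nx ∈ connectA.getD x []) : nx < 7 := by
  rcases x with _|_|_|_|_|_|_|x <;> simp [connectA, List.getD] at h <;> omega

theorem firstLit_congr (l l' : List Int)
    (H : ∀ i : Nat, i < 7 → PySem.List.pyGetD l (i : Int) 0 = PySem.List.pyGetD l' (i : Int) 0)
    (is : List Nat) (h : ∀ i ∈ is, i < 7) : firstLit l is = firstLit l' is := by
  induction is with
  | nil => rfl
  | cons i rest ih =>
      simp only [firstLit, H i (h i (by simp))]
      rw [ih (fun j hj => h j (by simp [hj]))]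

theorem firstLit_mem (l : List Int) (is : List Nat) (i : Nat)
    (h : firstLit l is = some i) : i ∈ is := by
  induction is with
  | nil => simp [firstLit] at h
  | cons j rest ih =>
      simp only [firstLit] at h
      split at h
      · simp at h; simp [h]
      · exact List.mem_cons_of_mem _ (ih h)

theorem relaxF_congr (l l' : List Int)
    (H : ∀ i : Nat, i < 7 → PySem.List.pyGetD l (i : Int) 0 = PySem.List.pyGetD l' (i : Int) 0)
    (ns : List Nat) : ∀ (s : List Int × List Nat), (∀ nx ∈ ns, nx < 7) →
      ns.foldl (relaxStep l) s = ns.foldl (relaxStep l') s := by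
  induction ns with
  | nil => intros; rfl
  | cons nx rest ih =>
      intro s h
      simp only [List.foldl_cons]
      have hstep : relaxStep l s nx = relaxStep l' s nx := by
        simp only [relaxStep, H nx (h nx (by simp))]
      rw [hstep]; exact ih _ (fun j hj => h j (by simp [hj]))

theorem relaxF_q_lt (l : List Int) (ns : List Nat) :
    ∀ (s : List Int × List Nat), (∀ nx ∈ ns, nx < 7) → (∀ y ∈ s.2, y < 7) →
      ∀ y ∈ (ns.foldl (relaxStep l) s).2, y < 7 := by
  induction ns with
  | nil => intro s _ hs; exact hs
  | cons m rest ih =>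
      intro s h hs
      simp only [List.foldl_cons]
      refine ih _ (fun j hj => h j (by simp [hj])) ?_
      intro y hy
      unfold relaxStep at hy
      split at hy
      · simp only at hy
        rcases List.mem_append.mp hy with h' | h'
        · exact hs y h'
        · have hym : y = m := by simpa using h'
          rw [hym]; exact h m (by simp)
      · exact hs y hy

theorem relaxF_vis01 (l : List Int) (ns : List Nat) :
    ∀ (s : List Int × List Nat), (∀ y ∈ s.1, y = 0 ∨ y = 1) →
      ∀ y ∈ (ns.foldl (relaxStep l) s).1, y = 0 ∨ y = 1 := by
  induction ns with
  | nil => intro s hs; exact hs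
  | cons nx rest ih =>
      intro s hs
      simp only [List.foldl_cons]
      apply ih
      intro y hy
      unfold relaxStep at hy
      split at hy
      · rcases List.mem_or_eq_of_mem_set hy with h' | h'
        · exact hs y h'
        · right; exact h'
      · exact hs y hy

theorem relaxF_len (l : List Int) (ns : List Nat) :
    ∀ (s : List Int × List Nat), (ns.foldl (relaxStep l) s).1.length = s.1.length := by
  induction ns with
  | nil => intro s; rfl
  | cons nx rest ih =>
      intro s
      simp only [List.foldl_cons]
      rw [ih]
      unfold relaxStep
      split <;> simp

theorem bfs_congr (l l' : List Int)
    (H : ∀ i : Nat, i < 7 → PySem.List.pyGetD l (i : Int) 0 = PySem.List.pyGetD l' (i : Int) 0) :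
    ∀ (fuel : Nat) (vis : List Int) (q : List Nat), (∀ x ∈ q, x < 7) →
      bfs l fuel vis q = bfs l' fuel vis q := by
  intro fuel
  induction fuel with
  | zero => intros; rfl
  | succ f ih =>
      intro vis q hq
      cases q with
      | nil => rfl
      | cons x rest =>
          simp only [bfs]
          have hns : ∀ nx ∈ connectA.getD x [], nx < 7 := fun nx h => connectA_mem_lt x nx h
          rw [relaxF_congr l l' H _ (vis, rest) hns]
          exact ih _ _ (relaxF_q_lt l' _ (vis, rest) hns (fun y hy => hq y (by simp [hy])))

theorem bfs_vis01 (l : List Int) :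
    ∀ (fuel : Nat) (vis : List Int) (q : List Nat), (∀ y ∈ vis, y = 0 ∨ y = 1) →
      ∀ y ∈ bfs l fuel vis q, y = 0 ∨ y = 1 := by
  intro fuel
  induction fuel with
  | zero => intro vis q h; exact h
  | succ f ih =>
      intro vis q h
      cases q with
      | nil => exact h
      | cons x rest =>
          simp only [bfs]
          exact ih _ _ (relaxF_vis01 l _ (vis, rest) h)

theorem bfs_len (l : List Int) :
    ∀ (fuel : Nat) (vis : List Int) (q : List Nat), (bfs l fuel vis q).length = vis.length := by
  intro fuel
  induction fuel with
  | zero => intros; rfl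
  | succ f ih =>
      intro vis q
      cases q with
      | nil => rfl
      | cons x rest =>
          simp only [bfs]
          rw [ih, relaxF_len]

theorem all_congr_aux {xs : List Nat} {p q : Nat → Bool}
    (h : ∀ a ∈ xs, p a = q a) : xs.all p = xs.all q := by
  induction xs with
  | nil => rfl
  | cons x rest ih =>
      simp only [List.all_cons, h x (by simp)]
      rw [ih (fun a ha => h a (by simp [ha]))]

theorem check_congr (l l' : List Int)
    (H : ∀ i : Nat, i < 7 → PySem.List.pyGetD l (i : Int) 0 = PySem.List.pyGetD l' (i : Int) 0) :
    check l = check l' := by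
  simp only [check]
  rw [firstLit_congr l l' H (List.range 7) (by intro i hi; simpa using hi)]
  rcases hfe : firstLit l' (List.range 7) with _ | i <;> simp only
  · rw [bfs_congr l l' H 16 _ _ (by simp)]
    exact congrArg (fun b => if !b then false else if (7:Nat) == 7 then false else true)
      (all_congr_aux (fun a ha => by rw [H a (List.mem_range.mp ha)]))
  · have hi : i < 7 := List.mem_range.mp (firstLit_mem l' _ _ hfe)
    rw [bfs_congr l l' H 16 _ _ (by intro x hx; simp at hx; omega)]
    exact congrArg (fun b => if !b then false else if i == 7 then false else true)
      (all_congr_aux (fun a ha => by rw [H a (List.mem_range.mp ha)]))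

theorem check_alt_congr (l l' : List Int)
    (H : ∀ i : Nat, i < 7 → PySem.List.pyGetD l (i : Int) 0 = PySem.List.pyGetD l' (i : Int) 0) :
    check_alt l = check_alt l' := by
  simp only [check_alt]
  rw [List.map_congr_left (fun i hi => H i (List.mem_range.mp hi))]

theorem check_false_of_bad (l : List Int) (j : Nat) (hj : j < 7)
    (h0 : PySem.List.pyGetD l (j : Int) 0 ≠ 0) (h1 : PySem.List.pyGetD l (j : Int) 0 ≠ 1) :
    check l = false := by
  simp only [check]
  rcases hfe : firstLit l (List.range 7) with _ | i <;> simp only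
  · -- no lit cell found: vis starts as replicate 7 0, empty queue
    have h01 : ∀ y ∈ bfs l 16 (List.replicate 7 (0:Int)) [], y = 0 ∨ y = 1 :=
      bfs_vis01 l 16 _ [] (fun y hy => Or.inl (List.eq_of_mem_replicate hy))
    have hlen : (bfs l 16 (List.replicate 7 (0:Int)) []).length = 7 := by
      rw [bfs_len]; simp
    have hm : PySem.List.pyGetD (bfs l 16 (List.replicate 7 (0:Int)) []) (j : Int) 0
        ∈ bfs l 16 (List.replicate 7 (0:Int)) [] := by
      apply PySem.List.pyGetD_mem
      simp only [PySem.Raise.InRange, hlen]; omega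
    have key : (PySem.List.pyGetD (bfs l 16 (List.replicate 7 (0:Int)) []) (j : Int) 0
        == PySem.List.pyGetD l (j : Int) 0) = false := by
      apply beq_eq_false_iff_ne.mpr
      rcases h01 _ hm with h | h <;> rw [h] <;> omega
    have hall : ((List.range 7).all fun i =>
        PySem.List.pyGetD (bfs l 16 (List.replicate 7 (0:Int)) []) (i : Int) 0
          == PySem.List.pyGetD l (i : Int) 0) = false := by
      apply List.all_eq_false.mpr
      refine ⟨j, List.mem_range.mpr hj, ?_⟩
      simp only [key, Bool.false_eq_true, not_false_eq_true]
    rw [hall]; simp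
  · -- first lit cell i: vis starts as (replicate 7 0).set i 1, queue [i]
    have hvis01 : ∀ y ∈ (List.replicate 7 (0:Int)).set i 1, y = 0 ∨ y = 1 := by
      intro y hy
      rcases List.mem_or_eq_of_mem_set hy with h' | h'
      · exact Or.inl (List.eq_of_mem_replicate h')
      · exact Or.inr h'
    have h01 : ∀ y ∈ bfs l 16 ((List.replicate 7 (0:Int)).set i 1) [i], y = 0 ∨ y = 1 :=
      bfs_vis01 l 16 _ [i] hvis01
    have hlen : (bfs l 16 ((List.replicate 7 (0:Int)).set i 1) [i]).length = 7 := by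
      rw [bfs_len]; simp
    have hm : PySem.List.pyGetD (bfs l 16 ((List.replicate 7 (0:Int)).set i 1) [i]) (j : Int) 0
        ∈ bfs l 16 ((List.replicate 7 (0:Int)).set i 1) [i] := by
      apply PySem.List.pyGetD_mem
      simp only [PySem.Raise.InRange, hlen]; omega
    have key : (PySem.List.pyGetD (bfs l 16 ((List.replicate 7 (0:Int)).set i 1) [i]) (j : Int) 0
        == PySem.List.pyGetD l (j : Int) 0) = false := by
      apply beq_eq_false_iff_ne.mpr
      rcases h01 _ hm with h | h <;> rw [h] <;> omega
    have hall : ((List.range 7).all fun i' =>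
        PySem.List.pyGetD (bfs l 16 ((List.replicate 7 (0:Int)).set i 1) [i]) (i' : Int) 0
          == PySem.List.pyGetD l (i' : Int) 0) = false := by
      apply List.all_eq_false.mpr
      refine ⟨j, List.mem_range.mpr hj, ?_⟩
      simp only [key, Bool.false_eq_true, not_false_eq_true]
    rw [hall]; simp

theorem check_alt_false_of_bad (l : List Int) (j : Nat) (hj : j < 7)
    (h0 : PySem.List.pyGetD l (j : Int) 0 ≠ 0) (h1 : PySem.List.pyGetD l (j : Int) 0 ≠ 1) :
    check_alt l = false := by
  simp only [check_alt]
  have hmem : PySem.List.pyGetD l (j : Int) 0 ∈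
      (List.range 7).map fun (i : Nat) => PySem.List.pyGetD l (i : Int) 0 :=
    List.mem_map.mpr ⟨j, List.mem_range.mpr hj, rfl⟩
  have hall : (((List.range 7).map fun (i : Nat) => PySem.List.pyGetD l (i : Int) 0).all
      fun x => x == 0 || x == 1) = false :=
    List.all_eq_false.mpr ⟨_, hmem, by
      simp only [Bool.or_eq_true, beq_iff_eq]
      exact fun h => h.elim h0 h1⟩
  rw [hall]; rfl

set_option maxRecDepth 20000 in
theorem main7 (a b c d e f g : Int) :
    check [a, b, c, d, e, f, g] = check_alt [a, b, c, d, e, f, g] := by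
  by_cases ha : a = 0 ∨ a = 1
  case neg =>
    push_neg at ha
    rw [check_false_of_bad _ 0 (by norm_num) (by simpa using ha.1) (by simpa using ha.2),
        check_alt_false_of_bad _ 0 (by norm_num) (by simpa using ha.1) (by simpa using ha.2)]
  by_cases hb : b = 0 ∨ b = 1
  case neg =>
    push_neg at hb
    rw [check_false_of_bad _ 1 (by norm_num) (by simpa using hb.1) (by simpa using hb.2),
        check_alt_false_of_bad _ 1 (by norm_num) (by simpa using hb.1) (by simpa using hb.2)]
  by_cases hc : c = 0 ∨ c = 1
  case neg =>
    push_neg at hc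
    rw [check_false_of_bad _ 2 (by norm_num) (by simpa using hc.1) (by simpa using hc.2),
        check_alt_false_of_bad _ 2 (by norm_num) (by simpa using hc.1) (by simpa using hc.2)]
  by_cases hd : d = 0 ∨ d = 1
  case neg =>
    push_neg at hd
    rw [check_false_of_bad _ 3 (by norm_num) (by simpa using hd.1) (by simpa using hd.2),
        check_alt_false_of_bad _ 3 (by norm_num) (by simpa using hd.1) (by simpa using hd.2)]
  by_cases he : e = 0 ∨ e = 1
  case neg =>
    push_neg at he
    rw [check_false_of_bad _ 4 (by norm_num) (by simpa using he.1) (by simpa using he.2),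
        check_alt_false_of_bad _ 4 (by norm_num) (by simpa using he.1) (by simpa using he.2)]
  by_cases hf : f = 0 ∨ f = 1
  case neg =>
    push_neg at hf
    rw [check_false_of_bad _ 5 (by norm_num) (by simpa using hf.1) (by simpa using hf.2),
        check_alt_false_of_bad _ 5 (by norm_num) (by simpa using hf.1) (by simpa using hf.2)]
  by_cases hg : g = 0 ∨ g = 1
  case neg =>
    push_neg at hg
    rw [check_false_of_bad _ 6 (by norm_num) (by simpa using hg.1) (by simpa using hg.2),
        check_alt_false_of_bad _ 6 (by norm_num) (by simpa using hg.1) (by simpa using hg.2)]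
  rcases ha with rfl | rfl <;> rcases hb with rfl | rfl <;> rcases hc with rfl | rfl <;>
    rcases hd with rfl | rfl <;> rcases he with rfl | rfl <;> rcases hf with rfl | rfl <;>
    rcases hg with rfl | rfl <;> decide

-- ===== VERDICT (by name: the statement is the Claim_ definition above) =====
theorem check_spec : Claim_equal_check := by
  intro l _ _
  unfold Spec_check
  have H : ∀ i : Nat, i < 7 → PySem.List.pyGetD l (i : Int) 0 =
      PySem.List.pyGetD [PySem.List.pyGetD l ((0:Nat) : Int) 0, PySem.List.pyGetD l ((1:Nat) : Int) 0,
        PySem.List.pyGetD l ((2:Nat) : Int) 0, PySem.List.pyGetD l ((3:Nat) : Int) 0,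
        PySem.List.pyGetD l ((4:Nat) : Int) 0, PySem.List.pyGetD l ((5:Nat) : Int) 0,
        PySem.List.pyGetD l ((6:Nat) : Int) 0] (i : Int) 0 := by
    intro i hi
    interval_cases i <;> simp [PySem.List.pyGetD_ofNat', List.getD]
  rw [check_congr _ _ H, check_alt_congr _ _ H]
  exact main7 _ _ _ _ _ _ _
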